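-- pv_equiv track=rewrite | github.com/fnburger/SmallPrograms | sentimental-readability/readability.py | count
-- ===== SOURCE A (Python) =====
-- def count(s):
--     # Returns array counters
--     # [0] .. number of sentences, [1] .. noo. words, [2] .. noo. letters
--     counters = [0, 0, 0]
--     alphabet = "abcdefghijklmnopqrstuvwxyzABCDEFGHIJKLMNOPQRSTUVWXYZ"
--     # Go through text and count word etc.
--     for i in range(len(s)):
--         c = s[i]
--         if c == "." or c == "!" or c == "?":
--             counters[0] += 1
--         elif c == " ":
--             counters[1] += 1
--         elif c in alphabet:
--             counters[2] += 1
--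
--     # Increase noo. words by one (spaces are counted)
--     if len(s) > 0:
--         counters[1] += 1
--
--     return counters
-- ===== SOURCE B (Python) =====
-- def count(s):
--     # Three independent scans instead of one combined elif pass.
--     alphabet = set("abcdefghijklmnopqrstuvwxyzABCDEFGHIJKLMNOPQRSTUVWXYZ")
--     sentences = sum(1 for c in s if c in ".!?")
--     words = sum(1 for c in s if c == " ") + (1 if s else 0)
--     letters = sum(1 for c in s if c in alphabet)
--     return [sentences, words, letters]
-- ===== Notes on version B (the rewrite author's own statement) =====
-- stated objective: idiomatic
-- what changed: Replaces the single indexed elif loop mutating a 3-slot counter list with three independent comprehension sums (sentence marks, spaces, explicit-ASCII letters).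
import Mathlib
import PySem

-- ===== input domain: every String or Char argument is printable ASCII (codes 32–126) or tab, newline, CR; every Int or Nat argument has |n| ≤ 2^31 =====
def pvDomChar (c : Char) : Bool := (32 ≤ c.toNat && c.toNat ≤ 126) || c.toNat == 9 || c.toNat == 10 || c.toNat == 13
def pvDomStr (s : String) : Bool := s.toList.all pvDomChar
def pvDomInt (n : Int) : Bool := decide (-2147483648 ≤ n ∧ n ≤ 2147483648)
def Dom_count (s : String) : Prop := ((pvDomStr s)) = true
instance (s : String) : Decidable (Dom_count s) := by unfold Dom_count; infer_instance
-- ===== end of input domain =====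

-- B replaces A's single indexed elif loop with three independent comprehension sums (idiomatic; same cost).

-- ===== PORT A =====
-- A scans the characters once ('c = s[i]' for i in range(len(s)) reads the chars in order),
-- updating a [sentences, words, letters] counter triple; 'c in alphabet' for a single char
-- is exactly membership of c in the alphabet's characters.
def pvAlphabetA : List Char := "abcdefghijklmnopqrstuvwxyzABCDEFGHIJKLMNOPQRSTUVWXYZ".toList

def count (s : String) : List Int :=
  let counters : Int × Int × Int :=
    s.toList.foldl (fun (cnt : Int × Int × Int) c =>
      if c == '.' || c == '!' || c == '?' then (cnt.1 + 1, cnt.2.1, cnt.2.2)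
      else if c == ' ' then (cnt.1, cnt.2.1 + 1, cnt.2.2)
      else if pvAlphabetA.contains c then (cnt.1, cnt.2.1, cnt.2.2 + 1)
      else cnt) (0, 0, 0)
  let words : Int := if s.toList.length > 0 then counters.2.1 + 1 else counters.2.1
  [counters.1, words, counters.2.2]

-- ===== PORT B =====
def pvAlphabetB : PySem.Set Char := PySem.Set.ofList "abcdefghijklmnopqrstuvwxyzABCDEFGHIJKLMNOPQRSTUVWXYZ".toList

def count_alt (s : String) : List Int :=
  let sentences : Int := (s.toList.map (fun c => if ".!?".toList.contains c then (1 : Int) else 0)).sum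
  let words : Int := (s.toList.map (fun c => if c == ' ' then (1 : Int) else 0)).sum
      + (if s.toList.length > 0 then 1 else 0)
  let letters : Int := (s.toList.map (fun c => if pvAlphabetB.contains c then (1 : Int) else 0)).sum
  [sentences, words, letters]

-- ===== PRECONDITION & SPEC =====
def Spec_count (s : String) (out : List Int) : Prop := out = count_alt s
instance (s : String) (out : List Int) : Decidable (Spec_count s out) := by unfold Spec_count; infer_instance

-- ===== CLAIM (what is proved, stated in full; the proofs are below) =====
def Claim_equal_count : Prop := ∀ (s : String), Dom_count s → Spec_count s (count s)

-- ===== LEMMAS AND PROOFS =====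

-- A's fold, with an arbitrary starting accumulator, adds the three independent 0/1-sums.
set_option maxRecDepth 4000 in
theorem pv_fold_eq (l : List Char) (a b c : Int) :
    l.foldl (fun (cnt : Int × Int × Int) ch =>
      if ch == '.' || ch == '!' || ch == '?' then (cnt.1 + 1, cnt.2.1, cnt.2.2)
      else if ch == ' ' then (cnt.1, cnt.2.1 + 1, cnt.2.2)
      else if pvAlphabetA.contains ch then (cnt.1, cnt.2.1, cnt.2.2 + 1)
      else cnt) (a, b, c)
    = (a + (l.map (fun ch => if ".!?".toList.contains ch then (1 : Int) else 0)).sum,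
       b + (l.map (fun ch => if ch == ' ' then (1 : Int) else 0)).sum,
       c + (l.map (fun ch => if pvAlphabetB.contains ch then (1 : Int) else 0)).sum) := by
  induction l generalizing a b c with
  | nil => simp
  | cons x xs ih =>
      have hAB : pvAlphabetB = pvAlphabetA := by decide
      have hmem : (".!?".toList.contains x) = (x == '.' || x == '!' || x == '?') := by
        have h : ".!?".toList = ['.', '!', '?'] := by decide
        rw [h]; simp [Bool.or_assoc]; rfl
      have hsetc : ∀ ch : Char, pvAlphabetB.contains ch = pvAlphabetA.contains ch := by
        intro ch; rw [hAB]; simp [PySem.Set.contains]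
      simp only [hsetc] at ih ⊢
      simp only [List.foldl_cons, List.map_cons, List.sum_cons, hmem]
      by_cases h1 : x = '.' ∨ x = '!' ∨ x = '?'
      · have b1 : (x == '.' || x == '!' || x == '?') = true := by
          rcases h1 with h | h | h <;> subst h <;> decide
        have b2 : (x == ' ') = false := by rcases h1 with h | h | h <;> subst h <;> decide
        have b3 : pvAlphabetA.contains x = false := by
          rcases h1 with h | h | h <;> subst h <;> decide
        simp only [b1, b2, b3, if_false, Bool.false_eq_true, ite_true]
        rw [ih]; simp only [Prod.mk.injEq]
        refine ⟨by ring, by ring, by ring⟩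
      · by_cases h2 : x = ' '
        · have b1 : (x == '.' || x == '!' || x == '?') = false := by subst h2; decide
          have b2 : (x == ' ') = true := by subst h2; decide
          have b3 : pvAlphabetA.contains x = false := by subst h2; decide
          simp only [b1, b2, b3, Bool.false_eq_true, ite_true, ite_false]
          rw [ih]; simp only [Prod.mk.injEq]
          refine ⟨by ring, by ring, by ring⟩
        · have b1 : (x == '.' || x == '!' || x == '?') = false := by
            rw [Bool.eq_false_iff]; intro hc
            exact h1 (by simpa [Bool.or_eq_true, beq_iff_eq, or_assoc] using hc)
          have b2 : (x == ' ') = false := by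
            rw [Bool.eq_false_iff]; intro hc; exact h2 (by simpa using hc)
          by_cases h3 : pvAlphabetA.contains x = true
          · simp only [b1, b2, h3, Bool.false_eq_true, ite_true, ite_false]
            rw [ih]; simp only [Prod.mk.injEq]
            refine ⟨by ring, by ring, by ring⟩
          · have b3 : pvAlphabetA.contains x = false := by rwa [Bool.not_eq_true] at h3
            simp only [b1, b2, b3, Bool.false_eq_true, ite_false]
            rw [ih]; simp only [Prod.mk.injEq]
            refine ⟨by ring, by ring, by ring⟩

-- ===== VERDICT (by name: the statement is the Claim_ definition above) =====
theorem count_spec : Claim_equal_count := by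
  intro s _
  unfold Spec_count count count_alt
  simp only [pv_fold_eq]
  simp
  split_ifs <;> ring
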